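-- pv_equiv track=rewrite | github.com/ywcheong/solved-baekjoon | solve/1500+/1652.py | solve_sero
-- ===== SOURCE A (Python) =====
-- EMPTY = "."
--
-- def solve_sero(room):
--     size = len(room)
--     count = 0
--
--     for j in range(size):
--         space = 0
--         for i in range(size):
--             if room[i][j] == EMPTY:
--                 space += 1
--                 if space == 2:
--                     count += 1
--             else:
--                 space = 0
--
--     return count
-- ===== SOURCE B (Python) =====
-- EMPTY = "."
--
-- def _eat_run(col, run):
--     # consume leading EMPTY cells, counting them into run
--     while col and col[0] == EMPTY:
--         run += 1
--         col = col[1:]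
--     return run, col
--
-- def _count_runs(col):
--     # number of maximal runs of EMPTY of length >= 2 in col
--     total = 0
--     while col:
--         if col[0] == EMPTY:
--             run, col = _eat_run(col[1:], 1)
--             if run >= 2:
--                 total += 1
--         else:
--             col = col[1:]
--     return total
--
-- def solve_sero(room):
--     size = len(room)
--     return sum(_count_runs([room[i][j] for i in range(size)]) for j in range(size))
-- ===== Notes on version B (the rewrite author's own statement) =====
-- stated objective: alternative
-- what changed: Replaces A's running space-counter state machine with a per-column pass that extracts the column, groups it into maximal runs of consecutive empty cells, and counts the runs of length >= 2; trades A's O(1)-state scan for explicit run extraction at a constant-factor cost.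
import Mathlib
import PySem

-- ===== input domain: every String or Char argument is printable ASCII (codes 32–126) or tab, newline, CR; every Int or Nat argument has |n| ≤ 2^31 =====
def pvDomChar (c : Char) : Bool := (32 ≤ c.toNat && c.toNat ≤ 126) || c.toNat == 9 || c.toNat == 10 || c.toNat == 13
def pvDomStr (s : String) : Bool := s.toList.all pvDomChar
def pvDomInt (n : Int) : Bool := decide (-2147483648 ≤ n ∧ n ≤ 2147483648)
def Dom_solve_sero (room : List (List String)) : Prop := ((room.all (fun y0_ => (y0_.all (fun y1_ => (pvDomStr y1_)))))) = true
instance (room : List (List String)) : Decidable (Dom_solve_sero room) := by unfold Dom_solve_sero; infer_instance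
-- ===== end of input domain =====

-- B replaces A's running space-counter with an explicit per-column pass grouping
-- maximal runs of empty cells and counting runs of length >= 2 (objective: alternative).

-- ===== PORT A =====
def solve_sero (room : List (List String)) : Int :=
  let size : Int := (room.length : Int)
  (PySem.List.pyRange 0 size 1).foldl (fun count j =>
    ((PySem.List.pyRange 0 size 1).foldl (fun (st : Int × Int) i =>
      -- room[i][j]; in range whenever Pre_ holds (outside, Python raises IndexError)
      if PySem.List.pyGetD (PySem.List.pyGetD room i []) j "" = "." then
        (if st.1 + 1 = 2 then (st.1 + 1, st.2 + 1) else (st.1 + 1, st.2))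
      else (0, st.2)) ((0 : Int), count)).2) 0

-- ===== PORT B =====
-- _eat_run: consume leading "." cells, counting them into run
def eatRun : List String → Int → Int × List String
  | [], run => (run, [])
  | x :: r, run => if x = "." then eatRun r (run + 1) else (run, x :: r)

theorem eatRun_len : ∀ (col : List String) (run : Int), (eatRun col run).2.length ≤ col.length := by
  intro col
  induction col with
  | nil => intro run; simp [eatRun]
  | cons x r ih =>
    intro run
    simp only [eatRun]
    split
    · exact le_trans (ih (run + 1)) (Nat.le_succ _)
    · simp

-- _count_runs: number of maximal runs of "." of length >= 2
def countRuns : List String → Int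
  | [] => 0
  | x :: r =>
    if x = "." then
      (if 2 ≤ (eatRun r 1).1 then (1 : Int) else 0) + countRuns (eatRun r 1).2
    else countRuns r
termination_by col => col.length
decreasing_by
  · exact Nat.lt_succ_of_le (eatRun_len r 1)
  · simp

def solve_sero_alt (room : List (List String)) : Int :=
  let size : Int := (room.length : Int)
  ((PySem.List.pyRange 0 size 1).map (fun j =>
    countRuns ((PySem.List.pyRange 0 size 1).map (fun i =>
      PySem.List.pyGetD (PySem.List.pyGetD room i []) j "")))).sum

-- ===== PRECONDITION & SPEC =====
-- Pre_ excludes ragged grids (some row shorter than the number of rows), on which both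
-- Pythons raise IndexError while building/reading the columns.
def Pre_solve_sero (room : List (List String)) : Prop :=
  ∀ row ∈ room, room.length ≤ row.length

instance (room : List (List String)) : Decidable (Pre_solve_sero room) := by
  unfold Pre_solve_sero; infer_instance

def pvWitness_solve_sero : List (List String) := [[".", "#"], [".", "."]]

def Spec_solve_sero (room : List (List String)) (out : Int) : Prop := out = solve_sero_alt room
instance (room : List (List String)) (out : Int) : Decidable (Spec_solve_sero room out) := by unfold Spec_solve_sero; infer_instance

-- ===== CLAIM (what is proved, stated in full; the proofs are below) =====
def Claim_equal_solve_sero : Prop := ∀ (room : List (List String)), Dom_solve_sero room → Pre_solve_sero room → Spec_solve_sero room (solve_sero room)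

-- ===== LEMMAS AND PROOFS =====

-- the accumulator semantics of A's inner state machine: runCnt s col = number of
-- qualifying runs still to be counted, given that s empty cells immediately precede col
def runCnt : Int → List String → Int
  | s, [] => (fun _ => 0) s
  | s, x :: r => if x = "." then (if s + 1 = 2 then 1 else 0) + runCnt (s + 1) r else runCnt 0 r

theorem foldA_snd (f : Int → String) :
    ∀ (col : List Int) (s c : Int),
      (col.foldl (fun (st : Int × Int) i =>
        if f i = "." then
          (if st.1 + 1 = 2 then (st.1 + 1, st.2 + 1) else (st.1 + 1, st.2))
        else (0, st.2)) (s, c)).2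
      = c + runCnt s (col.map f) := by
  intro col
  induction col with
  | nil => intro s c; simp [runCnt]
  | cons i rest ih =>
    intro s c
    simp only [List.foldl_cons, List.map_cons, runCnt]
    by_cases h : f i = "."
    · by_cases h2 : s + 1 = 2
      · simp [h, h2, ih]
        generalize runCnt 2 (List.map f rest) = R
        ring
      · simp [h, h2, ih]
    · simp [h, ih]

theorem eatRun_spec : ∀ (col : List String) (run : Int),
    eatRun col run = (run + ((col.takeWhile (fun s => s = ".")).length : Int),
                      col.dropWhile (fun s => s = ".")) := by
  intro col
  induction col with
  | nil => intro run; simp [eatRun]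
  | cons x r ih =>
    intro run
    simp only [eatRun, List.takeWhile, List.dropWhile]
    by_cases h : x = "."
    · simp [h, ih, Prod.mk.injEq]
      ring
    · simp [h]

theorem runCnt_big : ∀ (col : List String) (s : Int), 2 ≤ s →
    runCnt s col = runCnt 0 (col.dropWhile (fun t => t = ".")) := by
  intro col
  induction col with
  | nil => intro s _; simp [List.dropWhile, runCnt]
  | cons x r ih =>
    intro s hs
    simp only [runCnt, List.dropWhile]
    by_cases h : x = "."
    · have h2 : ¬ (s + 1 = 2) := by omega
      simp [h, h2]
      exact ih (s + 1) (by omega)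
    · simp [h]
      rw [runCnt]
      simp [h]

theorem runCnt_one : ∀ (col : List String),
    runCnt 1 col = (if 1 ≤ ((col.takeWhile (fun t => t = ".")).length : Int) then (1 : Int) else 0)
      + runCnt 0 (col.dropWhile (fun t => t = ".")) := by
  intro col
  cases col with
  | nil => simp [runCnt, List.takeWhile, List.dropWhile]
  | cons x r =>
    simp only [runCnt, List.takeWhile, List.dropWhile]
    by_cases h : x = "."
    · simp [h]
      rw [runCnt_big r 2 (by omega)]
    · simp [h]
      rw [runCnt]
      simp [h]

theorem countRuns_eq_runCnt : ∀ (col : List String), countRuns col = runCnt 0 col := by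
  have main : ∀ (n : Nat) (col : List String), col.length ≤ n → countRuns col = runCnt 0 col := by
    intro n
    induction n with
    | zero =>
      intro col h
      have : col = [] := List.length_eq_zero_iff.mp (Nat.le_zero.mp h)
      subst this; simp [countRuns, runCnt]
    | succ n ih =>
      intro col h
      cases col with
      | nil => simp [countRuns, runCnt]
      | cons x r =>
        simp only [countRuns, runCnt]
        by_cases hx : x = "."
        · simp only [hx, if_pos rfl, if_true]
          rw [eatRun_spec]
          have hdrop : (r.dropWhile (fun t => t = ".")).length ≤ n :=
            le_trans (List.length_dropWhile_le _ _) (by simpa using Nat.le_of_succ_le_succ h)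
          rw [ih _ hdrop]
          have h01 : (0 : Int) + 1 = 1 := by norm_num
          rw [h01, runCnt_one r]
          simp only []
          by_cases ht : 1 ≤ ((r.takeWhile (fun t => t = ".")).length : Int)
          · rw [if_pos ht, if_pos (by omega : (2:Int) ≤ 1 + ((r.takeWhile (fun s => s = ".")).length : Int))]
            norm_num
          · rw [if_neg ht, if_neg (by omega : ¬ (2:Int) ≤ 1 + ((r.takeWhile (fun s => s = ".")).length : Int))]
            norm_num
        · simp only [hx, if_neg hx]
          exact ih r (by simpa using Nat.le_of_succ_le_succ h)
  intro col; exact main col.length col le_rfl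

theorem foldl_add_sum (h : Int → Int) : ∀ (l : List Int) (c : Int),
    l.foldl (fun acc j => acc + h j) c = c + (l.map h).sum := by
  intro l
  induction l with
  | nil => intro c; simp
  | cons x r ih => intro c; simp [List.foldl_cons, ih]; ring

-- ===== VERDICT (by name: the statement is the Claim_ definition above) =====
theorem solve_sero_spec : Claim_equal_solve_sero := by
  intro room _ _
  unfold Spec_solve_sero solve_sero solve_sero_alt
  simp only []
  have hbody : ∀ (count j : Int),
      ((PySem.List.pyRange 0 (room.length : Int) 1).foldl (fun (st : Int × Int) i =>
        if PySem.List.pyGetD (PySem.List.pyGetD room i []) j "" = "." then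
          (if st.1 + 1 = 2 then (st.1 + 1, st.2 + 1) else (st.1 + 1, st.2))
        else (0, st.2)) ((0 : Int), count)).2
      = count + countRuns ((PySem.List.pyRange 0 (room.length : Int) 1).map (fun i => PySem.List.pyGetD (PySem.List.pyGetD room i []) j "")) := by
    intro count j
    rw [foldA_snd (fun i => PySem.List.pyGetD (PySem.List.pyGetD room i []) j "") _ 0 count, countRuns_eq_runCnt]
  calc (PySem.List.pyRange 0 (room.length : Int) 1).foldl (fun count j =>
        ((PySem.List.pyRange 0 (room.length : Int) 1).foldl (fun (st : Int × Int) i =>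
          if PySem.List.pyGetD (PySem.List.pyGetD room i []) j "" = "." then
            (if st.1 + 1 = 2 then (st.1 + 1, st.2 + 1) else (st.1 + 1, st.2))
          else (0, st.2)) ((0 : Int), count)).2) 0
      = (PySem.List.pyRange 0 (room.length : Int) 1).foldl (fun count j =>
          count + countRuns ((PySem.List.pyRange 0 (room.length : Int) 1).map (fun i => PySem.List.pyGetD (PySem.List.pyGetD room i []) j ""))) 0 := by
        apply PySem.List.foldl_congr_mem
        intro count j _; exact hbody count j
    _ = _ := by
        rw [foldl_add_sum]
        simp
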